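-- pv_equiv track=rewrite | github.com/Shrikar-Kota/Discord-cricket-bot | my_functions/summary_board.py | please_sort_me_bowling
-- ===== SOURCE A (Python) =====
-- def please_sort_me_bowling(orders):
--     if len(orders)==0:
--         return []
--     sort_orders = sorted(orders.items(), key = lambda x : (x[1]["wickets"],-x[1]['runs']), reverse=True)
--     sort_orders=list(sort_orders)
--     if len(sort_orders)>3:
--         sort_orders=sort_orders[:3]
--     i=0
--     while 1:
--         if sort_orders[i][1]["wickets"]==0:
--             sort_orders.pop(i)
--         else:
--             i+=1
--         if i==len(sort_orders):
--             break
--     return sort_orders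
-- ===== SOURCE B (Python) =====
-- def please_sort_me_bowling(orders):
--     top3 = sorted(orders.items(), key=lambda x: (x[1]["wickets"], -x[1]["runs"]), reverse=True)[:3]
--     return [entry for entry in top3 if entry[1]["wickets"] != 0]
-- ===== Notes on version B (the rewrite author's own statement) =====
-- stated objective: simpler
-- what changed: B replaces A's length guard, conditional truncation copy and in-place while/pop/index cleanup loop with an unconditional [:3] slice followed by a filtering comprehension, proved equal to the pop loop.
import Mathlib
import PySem

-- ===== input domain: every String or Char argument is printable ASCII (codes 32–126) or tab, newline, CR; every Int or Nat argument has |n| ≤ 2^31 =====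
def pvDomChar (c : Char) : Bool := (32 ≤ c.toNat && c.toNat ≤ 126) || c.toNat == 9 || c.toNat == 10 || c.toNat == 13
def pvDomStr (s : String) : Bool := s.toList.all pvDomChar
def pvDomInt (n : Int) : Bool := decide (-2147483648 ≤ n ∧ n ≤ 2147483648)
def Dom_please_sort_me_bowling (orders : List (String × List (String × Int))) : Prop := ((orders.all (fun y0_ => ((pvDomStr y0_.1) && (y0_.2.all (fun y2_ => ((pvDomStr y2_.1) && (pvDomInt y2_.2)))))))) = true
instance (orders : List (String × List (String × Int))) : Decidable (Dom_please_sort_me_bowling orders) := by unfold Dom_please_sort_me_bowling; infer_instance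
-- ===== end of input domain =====

-- B replaces A's length guard, conditional truncation and in-place while/pop cleanup loop
-- with an unconditional [:3] slice followed by a filtering comprehension (objective: simpler).

-- ===== PORT A =====
-- x[1]["wickets"] / x[1]["runs"]: exact under Pre_ (both keys present); Python raises KeyError otherwise
def pvWk (v : List (String × Int)) : Int := PySem.Dict.getD (PySem.Dict.mk v) "wickets" 0
def pvRn (v : List (String × Int)) : Int := PySem.Dict.getD (PySem.Dict.mk v) "runs" 0

-- the 'while 1: … pop(i) … i+=1 … if i==len: break' loop of A, step for step
-- (list.pop(i) on a valid index 0 ≤ i < len is List.eraseIdx, exact)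
def pvPopLoop (l : List (String × List (String × Int))) (i : Nat) :
    List (String × List (String × Int)) :=
  if h : i < l.length then
    if pvWk (l[i].2) = 0 then
      let l' := l.eraseIdx i
      if i = l'.length then l' else pvPopLoop l' i
    else
      if i + 1 = l.length then l else pvPopLoop l (i + 1)
  else l
termination_by l.length - i
decreasing_by
  · have hl : l'.length = l.length - 1 := by
      simp [l', List.length_eraseIdx, h]
    simp only [l'] at *
    omega
  · omega

def please_sort_me_bowling (orders : List (String × List (String × Int))) :
    List (String × (List (String × Int))) :=
  if orders.length = 0 then []
  else
    let sort_orders := PySem.List.sorted2 orders (fun x => pvWk x.2) (fun x => -(pvRn x.2)) true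
    let sort_orders := if sort_orders.length > 3 then sort_orders.take 3 else sort_orders  -- [:3]
    pvPopLoop sort_orders 0

-- ===== PORT B =====
def please_sort_me_bowling_alt (orders : List (String × List (String × Int))) :
    List (String × (List (String × Int))) :=
  -- sorted(..., reverse=True)[:3]  (slice [:3] = take 3, exact)
  let top3 := (PySem.List.sorted2 orders (fun x => pvWk x.2) (fun x => -(pvRn x.2)) true).take 3
  top3.filter (fun e => pvWk e.2 != 0)

-- ===== PRECONDITION & SPEC =====
-- Pre_ excludes exactly the inputs where A raises KeyError: some value dict lacks "wickets" or "runs".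
def Pre_please_sort_me_bowling (orders : List (String × List (String × Int))) : Prop :=
  ∀ p ∈ orders, "wickets" ∈ p.2.map Prod.fst ∧ "runs" ∈ p.2.map Prod.fst
instance (orders : List (String × List (String × Int))) : Decidable (Pre_please_sort_me_bowling orders) := by
  unfold Pre_please_sort_me_bowling; infer_instance

def pvWitness_please_sort_me_bowling : (List (String × List (String × Int))) :=
  [("alice", [("wickets", 2), ("runs", 10)]), ("bob", [("wickets", 0), ("runs", 4)])]

def Spec_please_sort_me_bowling (orders : List (String × List (String × Int))) (out : List (String × (List (String × Int)))) : Prop := out = please_sort_me_bowling_alt orders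
instance (orders : List (String × List (String × Int))) (out : List (String × (List (String × Int)))) : Decidable (Spec_please_sort_me_bowling orders out) := by unfold Spec_please_sort_me_bowling; infer_instance

-- ===== CLAIM (what is proved, stated in full; the proofs are below) =====
def Claim_equal_please_sort_me_bowling : Prop := ∀ (orders : List (String × List (String × Int))), Dom_please_sort_me_bowling orders → Pre_please_sort_me_bowling orders → Spec_please_sort_me_bowling orders (please_sort_me_bowling orders)

-- ===== LEMMAS AND PROOFS =====

-- A's cleanup loop is a filter: from any in-range index i it keeps the prefix before i
-- and filters the rest by nonzero wickets.
set_option maxRecDepth 8192 in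
theorem pvPopLoop_eq_filter (l : List (String × List (String × Int))) (i : Nat)
    (h : i < l.length) :
    pvPopLoop l i = l.take i ++ (l.drop i).filter (fun e => pvWk e.2 != 0) := by
  induction l, i using pvPopLoop.induct with
  | case1 l i hlt hw l' hbrk =>
    -- pop at i, then i == len(l'): i is the last index and l[i] has zero wickets
    rw [pvPopLoop]
    simp only [l'] at hbrk
    have hlen : l.eraseIdx i = l.take i ++ l.drop (i + 1) := List.eraseIdx_eq_take_drop_succ ..
    have hone : l.drop i = l[i] :: l.drop (i + 1) := List.drop_eq_getElem_cons hlt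
    have hnil : l.drop (i + 1) = [] := by
      rw [List.drop_eq_nil_iff]
      simp [List.length_eraseIdx, hlt] at hbrk
      omega
    rw [dif_pos hlt, if_pos hw, if_pos hbrk]
    simp [hlen, hone, hnil, hw]
  | case2 l i hlt hw l' hbrk ih =>
    rw [pvPopLoop]
    simp only [l'] at hbrk ih
    have hlen : (l.eraseIdx i).length = l.length - 1 := by
      simp [List.length_eraseIdx, hlt]
    have hlt' : i < (l.eraseIdx i).length := by omega
    have hmk : l.eraseIdx i = l.take i ++ l.drop (i + 1) := List.eraseIdx_eq_take_drop_succ ..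
    have hone : l.drop i = l[i] :: l.drop (i + 1) := List.drop_eq_getElem_cons hlt
    have htk : (l.take i).length = i := by simp; omega
    rw [dif_pos hlt, if_pos hw, if_neg hbrk, ih hlt', hmk, hone]
    rw [List.take_append_of_le_length (by omega), List.drop_append_of_le_length (by omega)]
    rw [List.take_take, Nat.min_self]
    have hdt : List.drop i (List.take i l) = [] := by rw [List.drop_eq_nil_iff, htk]
    have hc : (pvWk l[i].2 != 0) = false := by simp [hw]
    rw [hdt, List.nil_append, List.filter_cons, hc, if_neg Bool.false_ne_true]
  | case3 l i hlt hw hbrk =>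
    rw [pvPopLoop]
    have hone : l.drop i = l[i] :: l.drop (i + 1) := List.drop_eq_getElem_cons hlt
    have hnil : l.drop (i + 1) = [] := by rw [List.drop_eq_nil_iff]; omega
    have : l.take i ++ [l[i]] = l.take (i + 1) := by
      rw [List.take_add_one]
      simp [List.getElem?_eq_getElem hlt]
    simp only [dif_pos hlt, if_neg hw, if_pos hbrk, hone, hnil, List.filter_cons,
      List.filter_nil]
    simp only [hw, bne_iff_ne, ne_eq, not_false_iff, if_pos]
    rw [this, hbrk, List.take_length]
  | case4 l i hlt hw hbrk ih =>
    rw [pvPopLoop]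
    have hlt' : i + 1 < l.length := by omega
    have hone : l.drop i = l[i] :: l.drop (i + 1) := List.drop_eq_getElem_cons hlt
    have htk : l.take (i + 1) = l.take i ++ [l[i]] := by
      rw [List.take_add_one]
      simp [List.getElem?_eq_getElem hlt]
    rw [dif_pos hlt, if_neg hw, if_neg hbrk, ih hlt', hone, List.filter_cons]
    have hc : (pvWk l[i].2 != 0) = true := by simp [hw]
    rw [hc, if_pos rfl, htk, List.append_assoc, List.singleton_append]
  | case5 l i hge =>
    omega

theorem please_sort_me_bowling_spec : Claim_equal_please_sort_me_bowling := by
  intro orders _ _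
  unfold Spec_please_sort_me_bowling please_sort_me_bowling please_sort_me_bowling_alt
  by_cases h0 : orders.length = 0
  · have : orders = [] := List.eq_nil_of_length_eq_zero h0
    subst this
    simp [PySem.List.sorted2]
  · simp only [h0, if_false]
    set s := PySem.List.sorted2 orders (fun x => pvWk x.2) (fun x => -(pvRn x.2)) true with hs
    have hslen : s.length = orders.length := by
      rw [hs]; exact (PySem.List.sorted2_perm ..).length_eq
    have hcut : (if s.length > 3 then s.take 3 else s) = s.take 3 := by
      split
      · rfl
      · rw [List.take_of_length_le (by omega)]
    have hpos : 0 < (s.take 3).length := by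
      simp [List.length_take]; omega
    rw [hcut, pvPopLoop_eq_filter _ 0 hpos]
    simp
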